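-- pv_equiv track=rewrite | github.com/bpluis/WrestlingBot | cogs/wrestler.py | filter_moves_by_character
-- ===== SOURCE A (Python) =====
-- def filter_moves_by_character(available_moves, alignment, archetype, category):
--     """Filter moves based on alignment and archetype - return 5-6 best fits"""
--
--     # Define move preferences
--     heel_keywords = ['choke', 'sleeper', 'guillotine', 'rear naked', 'trap', 'heel', 'behind']
--     face_keywords = ['splash', 'press', 'crossbody', 'moonsault', 'elbow drop']
--     technical_keywords = ['lock', 'bar', 'crab', 'stretch', 'figure']
--     power_keywords = ['slam', 'bomb', 'press', 'gorilla', 'military']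
--     aerial_keywords = ['diving', 'springboard', 'moonsault', 'splash', 'shooting star', 'top rope']
--
--     scored_moves = []
--
--     for move in available_moves:
--         move_lower = move.lower()
--         score = 0
--
--         # Alignment scoring
--         if alignment == "Heel":
--             if any(kw in move_lower for kw in heel_keywords):
--                 score += 3
--         elif alignment == "Face":
--             if any(kw in move_lower for kw in face_keywords):
--                 score += 3
--             if any(kw in move_lower for kw in heel_keywords):
--                 score -= 2
--
--         # Archetype scoring
--         if archetype == "Technical":
--             if any(kw in move_lower for kw in technical_keywords):
--                 score += 2
--         elif archetype == "Powerhouse":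
--             if any(kw in move_lower for kw in power_keywords):
--                 score += 2
--         elif archetype == "High Flyer":
--             if any(kw in move_lower for kw in aerial_keywords):
--                 score += 2
--
--         scored_moves.append((move, score))
--
--     # Sort by score and return top 5-6
--     scored_moves.sort(key=lambda x: x[1], reverse=True)
--
--     # Return top 6, or all if less than 6
--     result = [move for move, score in scored_moves[:6]]
--
--     # If we have less than 5, add more random ones
--     if len(result) < 5 and len(available_moves) > len(result):
--         remaining = [m for m in available_moves if m not in result]
--         result.extend(remaining[:5-len(result)])
--
--     return result
-- ===== SOURCE B (Python) =====
-- # Bucket-by-score instead of a comparison sort: for each distinct score in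
-- # descending order, emit the matching moves in input order; take the first 6.
-- HEEL_KW = ['choke', 'sleeper', 'guillotine', 'rear naked', 'trap', 'heel', 'behind']
-- FACE_KW = ['splash', 'press', 'crossbody', 'moonsault', 'elbow drop']
-- TECH_KW = ['lock', 'bar', 'crab', 'stretch', 'figure']
-- POWER_KW = ['slam', 'bomb', 'press', 'gorilla', 'military']
-- AERIAL_KW = ['diving', 'springboard', 'moonsault', 'splash', 'shooting star', 'top rope']
--
--
-- def _score(move_lower, alignment, archetype):
--     score = 0
--     if alignment == "Heel":
--         if any(kw in move_lower for kw in HEEL_KW):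
--             score += 3
--     elif alignment == "Face":
--         if any(kw in move_lower for kw in FACE_KW):
--             score += 3
--         if any(kw in move_lower for kw in HEEL_KW):
--             score -= 2
--     if archetype == "Technical":
--         if any(kw in move_lower for kw in TECH_KW):
--             score += 2
--     elif archetype == "Powerhouse":
--         if any(kw in move_lower for kw in POWER_KW):
--             score += 2
--     elif archetype == "High Flyer":
--         if any(kw in move_lower for kw in AERIAL_KW):
--             score += 2
--     return score
--
--
-- def filter_moves_by_character(available_moves, alignment, archetype, category):
--     pairs = [(m, _score(m.lower(), alignment, archetype)) for m in available_moves]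
--     ranked = []
--     for s in sorted({sc for _, sc in pairs}, reverse=True):
--         ranked.extend(m for m, sc in pairs if sc == s)
--     return ranked[:6]
-- ===== Notes on version B (the rewrite author's own statement) =====
-- stated objective: alternative
-- what changed: Replaces the stable reverse comparison sort of (move,score) pairs (and A's dead <5 fallback block) with a bucket pass: moves are grouped by score and emitted per distinct score in descending order, in input order within a score.
import Mathlib
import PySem

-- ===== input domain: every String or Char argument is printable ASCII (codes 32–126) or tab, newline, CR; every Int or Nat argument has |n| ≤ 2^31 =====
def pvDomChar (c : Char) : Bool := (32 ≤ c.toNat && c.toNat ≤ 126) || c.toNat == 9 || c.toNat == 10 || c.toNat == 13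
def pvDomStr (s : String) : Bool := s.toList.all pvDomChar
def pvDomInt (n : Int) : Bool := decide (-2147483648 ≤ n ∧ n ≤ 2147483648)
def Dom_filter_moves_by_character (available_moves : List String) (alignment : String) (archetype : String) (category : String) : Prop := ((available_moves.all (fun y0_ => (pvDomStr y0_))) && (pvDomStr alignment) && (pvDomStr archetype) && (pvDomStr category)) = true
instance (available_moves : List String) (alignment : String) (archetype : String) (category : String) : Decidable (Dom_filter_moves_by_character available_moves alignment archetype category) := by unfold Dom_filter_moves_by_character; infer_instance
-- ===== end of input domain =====

-- B replaces A's stable reverse comparison sort (and A's dead "<5 fallback" block) with a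
-- bucket pass over the distinct scores in descending order.

-- ===== PORT A =====
def pvHeelKW : List String := ["choke", "sleeper", "guillotine", "rear naked", "trap", "heel", "behind"]
def pvFaceKW : List String := ["splash", "press", "crossbody", "moonsault", "elbow drop"]
def pvTechKW : List String := ["lock", "bar", "crab", "stretch", "figure"]
def pvPowerKW : List String := ["slam", "bomb", "press", "gorilla", "military"]
def pvAerialKW : List String := ["diving", "springboard", "moonsault", "splash", "shooting star", "top rope"]

-- any(kw in move_lower for kw in kws)
def pvAnyA (kws : List String) (move_lower : String) : Bool :=
  kws.any (fun kw => PySem.Str.isIn kw move_lower)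

def filter_moves_by_character (available_moves : List String) (alignment : String) (archetype : String) (category : String) : List String :=
  let scored_moves : List (String × Int) := available_moves.foldl (fun acc move =>
    let move_lower := PySem.Str.lower move
    let score : Int := 0
    let score := if alignment == "Heel" then
        (if pvAnyA pvHeelKW move_lower then score + 3 else score)
      else if alignment == "Face" then
        let score := if pvAnyA pvFaceKW move_lower then score + 3 else score
        if pvAnyA pvHeelKW move_lower then score - 2 else score
      else score
    let score := if archetype == "Technical" then
        (if pvAnyA pvTechKW move_lower then score + 2 else score)
      else if archetype == "Powerhouse" then
        (if pvAnyA pvPowerKW move_lower then score + 2 else score)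
      else if archetype == "High Flyer" then
        (if pvAnyA pvAerialKW move_lower then score + 2 else score)
      else score
    acc ++ [(move, score)]) []
  let sorted_moves := PySem.List.sorted scored_moves (fun x => x.2) true
  let result := (PySem.List.slice sorted_moves none (some 6)).map (fun p => p.1)
  if result.length < 5 ∧ available_moves.length > result.length then
    let remaining := available_moves.filter (fun m => !(result.contains m))
    result ++ PySem.List.slice remaining none (some (5 - (result.length : Int)))
  else result

-- ===== PORT B =====
-- B's helper _score(move_lower, alignment, archetype)
def pvScoreB (move_lower : String) (alignment : String) (archetype : String) : Int :=
  let score : Int := 0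
  let score := if alignment == "Heel" then
      (if pvAnyA pvHeelKW move_lower then score + 3 else score)
    else if alignment == "Face" then
      let score := if pvAnyA pvFaceKW move_lower then score + 3 else score
      if pvAnyA pvHeelKW move_lower then score - 2 else score
    else score
  if archetype == "Technical" then
    (if pvAnyA pvTechKW move_lower then score + 2 else score)
  else if archetype == "Powerhouse" then
    (if pvAnyA pvPowerKW move_lower then score + 2 else score)
  else if archetype == "High Flyer" then
    (if pvAnyA pvAerialKW move_lower then score + 2 else score)
  else score

def filter_moves_by_character_alt (available_moves : List String) (alignment : String) (archetype : String) (category : String) : List String :=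
  let pairs := available_moves.map (fun m => (m, pvScoreB (PySem.Str.lower m) alignment archetype))
  let keys := PySem.List.sorted (PySem.Set.ofList (pairs.map (fun p => p.2))) (fun x => x) true
  let ranked := keys.foldl (fun acc s => acc ++ (pairs.filter (fun p => p.2 == s)).map (fun p => p.1)) []
  PySem.List.slice ranked none (some 6)

-- ===== PRECONDITION & SPEC =====
def Spec_filter_moves_by_character (available_moves : List String) (alignment : String) (archetype : String) (category : String) (out : List String) : Prop := out = filter_moves_by_character_alt available_moves alignment archetype category
instance (available_moves : List String) (alignment : String) (archetype : String) (category : String) (out : List String) : Decidable (Spec_filter_moves_by_character available_moves alignment archetype category out) := by unfold Spec_filter_moves_by_character; infer_instance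

-- ===== CLAIM (what is proved, stated in full; the proofs are below) =====
def Claim_equal_filter_moves_by_character : Prop := ∀ (available_moves : List String) (alignment : String) (archetype : String) (category : String), Dom_filter_moves_by_character available_moves alignment archetype category → Spec_filter_moves_by_character available_moves alignment archetype category (filter_moves_by_character available_moves alignment archetype category)

-- ===== LEMMAS AND PROOFS =====

theorem pv_insertBy_cons_of_before {α : Type} (before : α → α → Bool) (x y : α) (ys : List α)
    (h : before x y = true) : PySem.List.insertBy before x (y :: ys) = x :: y :: ys := by
  simp [PySem.List.insertBy, h]

theorem pv_insertBy_cons_of_not_before {α : Type} (before : α → α → Bool) (x y : α) (ys : List α)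
    (h : before x y = false) :
    PySem.List.insertBy before x (y :: ys) = y :: PySem.List.insertBy before x ys := by
  simp [PySem.List.insertBy, h]

theorem pv_insertBy_skip {α : Type} (before : α → α → Bool) (x : α) (b rest : List α)
    (h : ∀ y ∈ b, before x y = false) :
    PySem.List.insertBy before x (b ++ rest) = b ++ PySem.List.insertBy before x rest := by
  induction b with
  | nil => simp
  | cons y b ih =>
      have hy : before x y = false := h y (by simp)
      simp only [List.cons_append, pv_insertBy_cons_of_not_before _ _ _ _ hy]
      rw [ih (fun z hz => h z (by simp [hz]))]

-- inserting x into a bucketed (strictly descending key order) list puts it at the end of its bucket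
theorem pv_insertBy_flatMap {α : Type} (key : α → Int) (x : α) (K : List Int) (ys : List α)
    (hK : K.Pairwise (fun a b => b < a)) (hx : key x ∈ K) :
    PySem.List.insertBy (fun a b => decide (key b < key a)) x
        (K.flatMap (fun k => ys.filter (fun e => key e == k)))
      = K.flatMap (fun k => (ys ++ [x]).filter (fun e => key e == k)) := by
  induction K with
  | nil => simp at hx
  | cons k K ih =>
      have hklt : ∀ k' ∈ K, k' < k := by
        intro k' hk'; exact (List.pairwise_cons.mp hK).1 k' hk'
      have hbucket : ∀ y ∈ ys.filter (fun e => key e == k), key y = k := by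
        intro y hy
        have := List.of_mem_filter hy
        simpa using this
      simp only [List.flatMap_cons]
      by_cases hxk : key x = k
      · -- x joins the first bucket, at its end
        have hskip : ∀ y ∈ ys.filter (fun e => key e == k),
            (fun a b => decide (key b < key a)) x y = false := by
          intro y hy; simp [hbucket y hy, hxk]
        rw [pv_insertBy_skip _ _ _ _ hskip]
        have htail : PySem.List.insertBy (fun a b => decide (key b < key a)) x
            (K.flatMap (fun k => ys.filter (fun e => key e == k)))
            = x :: K.flatMap (fun k => ys.filter (fun e => key e == k)) := by
          cases hrest : K.flatMap (fun k => ys.filter (fun e => key e == k)) with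
          | nil => simp [PySem.List.insertBy]
          | cons z zs =>
              have hz : z ∈ K.flatMap (fun k => ys.filter (fun e => key e == k)) := by
                simp [hrest]
              obtain ⟨k', hk', hzf⟩ := List.mem_flatMap.mp hz
              have hzk : key z = k' := by simpa using List.of_mem_filter hzf
              have hb : (fun a b => decide (key b < key a)) x z = true := by
                simp [hzk, hxk]; exact hklt k' hk'
              rw [pv_insertBy_cons_of_before _ _ _ _ hb]
        rw [htail]
        have hsame : ∀ k' ∈ K, (ys ++ [x]).filter (fun e => key e == k')
            = ys.filter (fun e => key e == k') := by
          intro k' hk'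
          have : key x ≠ k' := by have := hklt k' hk'; omega
          simp [List.filter_append, this]
        calc ys.filter (fun e => key e == k) ++
              (x :: K.flatMap (fun k => ys.filter (fun e => key e == k)))
            = (ys.filter (fun e => key e == k) ++ [x]) ++
              K.flatMap (fun k => ys.filter (fun e => key e == k)) := by simp
          _ = (ys ++ [x]).filter (fun e => key e == k) ++
              K.flatMap (fun k => (ys ++ [x]).filter (fun e => key e == k)) := by
              rw [List.filter_append]
              simp only [List.filter_cons, List.filter_nil]
              congr 1
              · simp [hxk]
              · exact (List.flatMap_congr (fun k' hk' => (hsame k' hk').symm))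
      · -- x's key is smaller than k: skip the first bucket entirely
        have hx' : key x ∈ K := by
          rcases List.mem_cons.mp hx with h | h
          · exact absurd h hxk
          · exact h
        have hlt : key x < k := hklt _ hx'
        have hskip : ∀ y ∈ ys.filter (fun e => key e == k),
            (fun a b => decide (key b < key a)) x y = false := by
          intro y hy; simp [hbucket y hy]; omega
        rw [pv_insertBy_skip _ _ _ _ hskip, ih (List.Pairwise.of_cons hK) hx']
        congr 1
        have : key x ≠ k := hxk
        simp [List.filter_append, this]

-- stable reverse sort = concatenation of the key buckets in descending key order
theorem pv_sorted_rev_eq_flatMap {α : Type} (key : α → Int) (xs : List α) (K : List Int)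
    (hK : K.Pairwise (fun a b => b < a)) (hmem : ∀ x ∈ xs, key x ∈ K) :
    PySem.List.sorted xs key true = K.flatMap (fun k => xs.filter (fun e => key e == k)) := by
  induction xs using List.reverseRecOn with
  | nil => simp [PySem.List.sorted]
  | append_singleton ys x ih =>
      have hys : ∀ y ∈ ys, key y ∈ K := fun y hy => hmem y (by simp [hy])
      have hx : key x ∈ K := hmem x (by simp)
      rw [PySem.List.sorted_rev_eq_foldl_insertBy] at *
      rw [List.foldl_append]
      simp only [List.foldl_cons, List.foldl_nil]
      rw [ih hys]
      exact pv_insertBy_flatMap key x K ys hK hx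

theorem pv_keys_pairwise (scores : List Int) :
    (PySem.List.sorted (PySem.Set.ofList scores) (fun x => x) true).Pairwise (fun a b => b < a) := by
  have hge := PySem.List.sorted_pairwise_rev (PySem.Set.ofList scores) (fun x => x)
  have hnd : (PySem.List.sorted (PySem.Set.ofList scores) (fun x => x) true).Nodup :=
    (PySem.List.sorted_perm (PySem.Set.ofList scores) (fun x => x) true).nodup_iff.mpr
      (PySem.Set.nodup_ofList scores)
  refine (hge.and hnd).imp ?_
  intro a b hab
  rcases hab with ⟨hle, hne⟩
  omega

-- xs[:6] is take 6
theorem pv_slice6 {β : Type} (xs : List β) : PySem.List.slice xs none (some 6) = xs.take 6 := by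
  rw [PySem.List.slice_to xs (by norm_num : (0:Int) ≤ 6)]
  rfl

-- A's accumulation loop builds exactly B's pairs list
theorem pv_scoredA_eq (available_moves : List String) (alignment archetype : String) :
    (available_moves.foldl (fun acc move =>
      let move_lower := PySem.Str.lower move
      let score : Int := 0
      let score := if alignment == "Heel" then
          (if pvAnyA pvHeelKW move_lower then score + 3 else score)
        else if alignment == "Face" then
          let score := if pvAnyA pvFaceKW move_lower then score + 3 else score
          if pvAnyA pvHeelKW move_lower then score - 2 else score
        else score
      let score := if archetype == "Technical" then
          (if pvAnyA pvTechKW move_lower then score + 2 else score)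
        else if archetype == "Powerhouse" then
          (if pvAnyA pvPowerKW move_lower then score + 2 else score)
        else if archetype == "High Flyer" then
          (if pvAnyA pvAerialKW move_lower then score + 2 else score)
        else score
      acc ++ [(move, score)]) ([] : List (String × Int)))
    = available_moves.map (fun m => (m, pvScoreB (PySem.Str.lower m) alignment archetype)) := by
  rw [PySem.List.foldl_append_singleton_eq_map]
  rfl

-- ===== VERDICT (by name: the statement is the Claim_ definition above) =====
theorem filter_moves_by_character_spec : Claim_equal_filter_moves_by_character := by
  intro available_moves alignment archetype category _
  unfold Spec_filter_moves_by_character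
  unfold filter_moves_by_character filter_moves_by_character_alt
  rw [pv_scoredA_eq]
  set pairs := available_moves.map
    (fun m => (m, pvScoreB (PySem.Str.lower m) alignment archetype)) with hpairs
  set K := PySem.List.sorted (PySem.Set.ofList (pairs.map (fun p => p.2))) (fun x => x) true
    with hKdef
  have hK : K.Pairwise (fun a b => b < a) := pv_keys_pairwise _
  have hmem : ∀ p ∈ pairs, (fun q : String × Int => q.2) p ∈ K := by
    intro p hp
    rw [hKdef, PySem.List.mem_sorted, PySem.Set.mem_ofList]
    exact List.mem_map_of_mem hp
  have hsorted := pv_sorted_rev_eq_flatMap (fun p => p.2) pairs K hK hmem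
  simp only [pv_slice6]
  rw [if_neg ?hc]
  case hc =>
    intro hcond
    rcases hcond with ⟨h1, h2⟩
    simp only [List.length_map, List.length_take, PySem.List.length_sorted, hpairs] at h1 h2
    omega
  rw [PySem.List.foldl_append_eq_flatMap, List.nil_append]
  show (List.take 6 (PySem.List.sorted pairs (fun x => x.2) true)).map (fun p => p.1)
      = List.take 6 (K.flatMap fun s => (pairs.filter fun p => p.2 == s).map fun p => p.1)
  rw [show PySem.List.sorted pairs (fun x => x.2) true
      = PySem.List.sorted pairs (fun p => p.2) true from rfl, hsorted]
  rw [List.map_take, List.map_flatMap]
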